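-- pv_equiv track=rewrite | github.com/cgebbe/prototype_ner_nobel_laureate | utils.py | _convert_wordlabels_to_tokenlabels
-- ===== SOURCE A (Python) =====
-- IGNORE_CLASS = -100
--
-- def _convert_wordlabels_to_tokenlabels(word_labels, word_idx_per_token):
--     """Converts labels per word to labels per token
--
--     Args:
--         word_labels (List[int]): Labels per word
--         word_idx_per_token (List[Optional[int]]): word index per token
--
--     Returns:
--         List[int]: labels per token
--     """
--     token_labels = []
--     previous_word_idx = None
--     for word_idx in word_idx_per_token:
--         if word_idx is None:
--             token_labels.append(IGNORE_CLASS)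
--         elif word_idx == previous_word_idx:
--             # if word is split into multiple tokens, only label first token
--             token_labels.append(IGNORE_CLASS)
--         else:
--             token_labels.append(word_labels[word_idx])
--         previous_word_idx = word_idx
--     assert len(token_labels) == len(word_idx_per_token)
--     return token_labels
-- ===== SOURCE B (Python) =====
-- IGNORE_CLASS = -100
--
--
-- def _convert_wordlabels_to_tokenlabels(word_labels, word_idx_per_token):
--     """Run-based rewrite: walk maximal runs of equal word indices;
--     label each run head, fill the rest of the run with IGNORE_CLASS."""
--     token_labels = []
--     i = 0
--     n = len(word_idx_per_token)
--     while i < n: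
--         key = word_idx_per_token[i]
--         j = i + 1
--         while j < n and word_idx_per_token[j] == key:
--             j += 1
--         if key is None:
--             token_labels += [IGNORE_CLASS] * (j - i)
--         else:
--             token_labels += [word_labels[key]] + [IGNORE_CLASS] * (j - i - 1)
--         i = j
--     return token_labels
-- ===== Notes on version B (the rewrite author's own statement) =====
-- stated objective: alternative
-- what changed: B iterates over maximal runs of consecutive equal word indices (groupby-style), labelling one run head and filling the rest of each run with IGNORE_CLASS, instead of A's per-element loop tracking a previous-index variable.
import Mathlib
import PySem

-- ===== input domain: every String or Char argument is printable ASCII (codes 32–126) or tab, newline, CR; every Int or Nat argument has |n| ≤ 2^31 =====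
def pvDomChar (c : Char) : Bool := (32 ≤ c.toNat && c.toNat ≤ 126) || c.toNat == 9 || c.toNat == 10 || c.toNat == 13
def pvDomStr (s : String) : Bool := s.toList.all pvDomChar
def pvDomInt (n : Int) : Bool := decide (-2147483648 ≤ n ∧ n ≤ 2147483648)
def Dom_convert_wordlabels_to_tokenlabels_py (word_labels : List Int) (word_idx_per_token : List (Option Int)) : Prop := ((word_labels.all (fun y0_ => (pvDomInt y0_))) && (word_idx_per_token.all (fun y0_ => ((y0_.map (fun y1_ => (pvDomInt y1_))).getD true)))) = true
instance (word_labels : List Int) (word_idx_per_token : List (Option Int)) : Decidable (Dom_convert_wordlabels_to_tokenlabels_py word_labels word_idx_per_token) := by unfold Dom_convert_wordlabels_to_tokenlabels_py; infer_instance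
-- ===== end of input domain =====

-- B walks maximal runs of equal word indices instead of tracking a previous index (alternative decomposition).
-- ===== PORT A =====
-- Python loop with `previous_word_idx`, element by element; out-of-range word_labels[i] raises in
-- Python (pyGet? = none) -- those inputs are excluded by Pre_ below, the port defaults to 0 there.
def pyGoA (word_labels : List Int) : List (Option Int) → Option Int → List Int
  | [], _ => []
  | w :: rest, prev =>
    (match w with
     | none => (-100 : Int)
     | some i => if some i = prev then (-100 : Int) else (PySem.List.pyGet? word_labels i).getD 0)
    :: pyGoA word_labels rest w

def convert_wordlabels_to_tokenlabels_py (word_labels : List Int) (word_idx_per_token : List (Option Int)) : List Int :=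
  pyGoA word_labels word_idx_per_token none

-- ===== PORT B =====
-- Source B: split off the maximal run of the head index, emit its labels, recurse on the remainder.
def pyGoB (word_labels : List Int) : List (Option Int) → List Int
  | [] => []
  | k :: rest =>
    let run := rest.takeWhile (· == k)
    let tail := rest.dropWhile (· == k)
    (match k with
     | none => List.replicate (run.length + 1) (-100 : Int)
     | some i => (PySem.List.pyGet? word_labels i).getD 0 :: List.replicate run.length (-100 : Int))
    ++ pyGoB word_labels tail
termination_by l => l.length
decreasing_by
  simp only [List.length_cons]
  exact Nat.lt_succ_of_le (List.length_dropWhile_le _ _)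

def convert_wordlabels_to_tokenlabels_py_alt (word_labels : List Int) (word_idx_per_token : List (Option Int)) : List Int :=
  pyGoB word_labels word_idx_per_token

-- ===== PRECONDITION & SPEC =====
-- Pre_ excludes exactly the inputs on which Python A raises IndexError: some token refers to a
-- word index outside Python's valid index range for word_labels.
def Pre_convert_wordlabels_to_tokenlabels_py (word_labels : List Int) (word_idx_per_token : List (Option Int)) : Prop :=
  ∀ o ∈ word_idx_per_token, ∀ i ∈ o, -(word_labels.length : Int) ≤ i ∧ i < word_labels.length
instance (word_labels : List Int) (word_idx_per_token : List (Option Int)) : Decidable (Pre_convert_wordlabels_to_tokenlabels_py word_labels word_idx_per_token) := by unfold Pre_convert_wordlabels_to_tokenlabels_py; infer_instance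
def pvWitness_convert_wordlabels_to_tokenlabels_py : List Int × List (Option Int) :=
  ([3, 7], [some 0, some 0, none, some 1, some (-1)])

def Spec_convert_wordlabels_to_tokenlabels_py (word_labels : List Int) (word_idx_per_token : List (Option Int)) (out : List Int) : Prop := out = convert_wordlabels_to_tokenlabels_py_alt word_labels word_idx_per_token
instance (word_labels : List Int) (word_idx_per_token : List (Option Int)) (out : List Int) : Decidable (Spec_convert_wordlabels_to_tokenlabels_py word_labels word_idx_per_token out) := by unfold Spec_convert_wordlabels_to_tokenlabels_py; infer_instance

-- ===== CLAIM (what is proved, stated in full; the proofs are below) =====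
def Claim_equal_convert_wordlabels_to_tokenlabels_py : Prop := ∀ (word_labels : List Int) (word_idx_per_token : List (Option Int)), Dom_convert_wordlabels_to_tokenlabels_py word_labels word_idx_per_token → Pre_convert_wordlabels_to_tokenlabels_py word_labels word_idx_per_token → Spec_convert_wordlabels_to_tokenlabels_py word_labels word_idx_per_token (convert_wordlabels_to_tokenlabels_py word_labels word_idx_per_token)

-- ===== LEMMAS AND PROOFS =====
-- skipping a run: while the head equals prev, pyGoA emits -100
lemma pyGoA_run (word_labels : List Int) (k : Option Int) :
    ∀ rest : List (Option Int),
      pyGoA word_labels rest k =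
        List.replicate (rest.takeWhile (· == k)).length (-100 : Int) ++
          pyGoA word_labels (rest.dropWhile (· == k)) k := by
  intro rest
  induction rest with
  | nil => simp [pyGoA]
  | cons h t ih =>
    by_cases hk : h = k
    · subst hk
      have : pyGoA word_labels (h :: t) h = (-100 : Int) :: pyGoA word_labels t h := by
        cases h with
        | none => simp [pyGoA]
        | some i => simp [pyGoA]
      rw [this, ih]
      simp [List.replicate_succ]
    · have hbe : (h == k) = false := by simpa using hk
      simp [hbe]

lemma head_dropWhile_ne (p : Option Int → Bool) :
    ∀ (l : List (Option Int)) (h : Option Int), (l.dropWhile p).head? = some h → p h = false := by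
  intro l
  induction l with
  | nil => intro h hh; simp at hh
  | cons a t ih =>
    intro h hh
    by_cases hp : p a
    · exact ih h (by simpa [List.dropWhile_cons, hp] using hh)
    · have ha : a = h := by simpa [List.dropWhile_cons, hp] using hh
      subst ha; simpa using hp

lemma pyGoA_eq_pyGoB (word_labels : List Int) :
    ∀ (n : ℕ) (wt : List (Option Int)) (prev : Option Int), wt.length ≤ n →
      (∀ h, wt.head? = some h → h ≠ none → h ≠ prev) →
      pyGoA word_labels wt prev = pyGoB word_labels wt := by
  intro n
  induction n with
  | zero =>
    intro wt prev hlen _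
    have : wt = [] := List.length_eq_zero_iff.mp (Nat.le_zero.mp hlen)
    subst this; simp [pyGoA, pyGoB]
  | succ n ih =>
    intro wt prev hlen hhd
    match wt with
    | [] => simp [pyGoA, pyGoB]
    | k :: rest =>
      have hrest : rest.length ≤ n := by simpa using Nat.succ_le_succ_iff.mp (by simpa using hlen)
      have htail : (rest.dropWhile (· == k)).length ≤ n :=
        le_trans (List.length_dropWhile_le _ _) hrest
      have htlhd : ∀ h, (rest.dropWhile (· == k)).head? = some h → h ≠ none → h ≠ k := by
        intro h hh _
        have := head_dropWhile_ne (· == k) rest h hh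
        simpa using this
      have hrec : pyGoA word_labels (rest.dropWhile (· == k)) k
          = pyGoB word_labels (rest.dropWhile (· == k)) := ih _ k htail htlhd
      have hskip := pyGoA_run word_labels k rest
      cases k with
      | none =>
        show ((-100 : Int) :: pyGoA word_labels rest none) = _
        rw [pyGoB, hskip, hrec]
        simp [List.replicate_succ]
      | some i =>
        have hne : some i ≠ prev := hhd (some i) rfl (by simp)
        show ((if some i = prev then (-100 : Int) else (PySem.List.pyGet? word_labels i).getD 0)
            :: pyGoA word_labels rest (some i)) = _
        rw [if_neg hne, pyGoB, hskip, hrec]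
        simp

-- ===== VERDICT (by name: the statement is the Claim_ definition above) =====
theorem convert_wordlabels_to_tokenlabels_py_spec : Claim_equal_convert_wordlabels_to_tokenlabels_py := by
  intro word_labels word_idx_per_token _ _
  unfold Spec_convert_wordlabels_to_tokenlabels_py convert_wordlabels_to_tokenlabels_py convert_wordlabels_to_tokenlabels_py_alt
  exact pyGoA_eq_pyGoB word_labels word_idx_per_token.length word_idx_per_token none le_rfl
    (fun h _ hn => hn)
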